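-- pv_equiv track=rewrite | github.com/jayded/evidence-inference | scripts/generate_tables/generate_split_stat_table.py | label_breakdown
-- ===== SOURCE A (Python) =====
-- def label_breakdown(data):
--     """ Find the label breakdown in data. """
--     res = {}
--     for row in data:
--         # if valid label
--         if (row[3]):
--             res[row[1]] = row[7]
--
--     neg, neu, pos = 0, 0, 0
--     for key in res.keys():
--         r = res[key]
--         if (r == -1):
--             neg += 1
--         elif (r == 0):
--             neu += 1
--         else:
--             pos += 1
--     return "{} / {} / {}".format(neg, neu, pos)
-- ===== SOURCE B (Python) =====
-- def label_breakdown(data):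
--     """ Find the label breakdown in data. """
--     seen = set()
--     neg = neu = pos = 0
--     for row in reversed(list(data)):
--         if row[3] and row[1] not in seen:
--             seen.add(row[1])
--             if row[7] == -1:
--                 neg += 1
--             elif row[7] == 0:
--                 neu += 1
--             else:
--                 pos += 1
--     return "{} / {} / {}".format(neg, neu, pos)
-- ===== Notes on version B (the rewrite author's own statement) =====
-- stated objective: alternative
-- what changed: Replaces A's two passes (build a last-wins dict, then count its values) by a single reversed pass that keeps only a seen-set of keys and three counters, classifying each key's first-in-reverse (= last-in-forward) valid value on the fly.
import Mathlib
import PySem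

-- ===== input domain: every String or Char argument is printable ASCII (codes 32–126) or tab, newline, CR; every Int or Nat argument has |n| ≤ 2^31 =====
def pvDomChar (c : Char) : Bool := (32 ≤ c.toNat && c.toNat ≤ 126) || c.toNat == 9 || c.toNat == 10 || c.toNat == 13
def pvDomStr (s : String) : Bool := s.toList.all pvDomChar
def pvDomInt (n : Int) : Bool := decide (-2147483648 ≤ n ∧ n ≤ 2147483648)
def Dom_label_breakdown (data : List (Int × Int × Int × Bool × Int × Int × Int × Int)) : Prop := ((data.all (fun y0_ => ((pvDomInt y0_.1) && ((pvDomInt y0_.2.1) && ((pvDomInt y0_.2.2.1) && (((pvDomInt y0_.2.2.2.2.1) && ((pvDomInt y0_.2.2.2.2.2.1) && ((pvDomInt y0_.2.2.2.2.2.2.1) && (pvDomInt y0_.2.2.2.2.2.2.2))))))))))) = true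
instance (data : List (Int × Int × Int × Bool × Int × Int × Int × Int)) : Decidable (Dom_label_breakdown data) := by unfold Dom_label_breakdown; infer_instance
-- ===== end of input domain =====

-- B replaces A's two passes (last-wins dict, then count values) by one reversed pass with a seen-set and three counters; same cost, different structure.

-- ===== PORT A =====
-- first loop: res[row[1]] = row[7] for valid rows
def pvDictOf (data : List (Int × Int × Int × Bool × Int × Int × Int × Int)) : PySem.Dict Int Int :=
  data.foldl (fun res row => if row.2.2.2.1 then res.insert row.2.1 row.2.2.2.2.2.2.2 else res) PySem.Dict.empty

def label_breakdown (data : List (Int × Int × Int × Bool × Int × Int × Int × Int)) : String :=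
  let res := pvDictOf data
  -- second loop: classify res[key] for each key (key always present, so getD's default is never used)
  let t := res.keys.foldl (fun (t : Int × Int × Int) key =>
    let r := res.getD key 0
    if r = -1 then (t.1 + 1, t.2.1, t.2.2)
    else if r = 0 then (t.1, t.2.1 + 1, t.2.2)
    else (t.1, t.2.1, t.2.2 + 1)) (0, 0, 0)
  PySem.Int.toStr t.1 ++ " / " ++ PySem.Int.toStr t.2.1 ++ " / " ++ PySem.Int.toStr t.2.2

-- ===== PORT B =====
-- single pass over reversed(data): seen-set of row[1] keys plus three counters
def pvStepB (st : PySem.Set Int × Int × Int × Int)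
    (row : Int × Int × Int × Bool × Int × Int × Int × Int) : PySem.Set Int × Int × Int × Int :=
  if row.2.2.2.1 && !(PySem.Set.contains st.1 row.2.1) then
    let seen := PySem.Set.add st.1 row.2.1
    if row.2.2.2.2.2.2.2 = -1 then (seen, st.2.1 + 1, st.2.2.1, st.2.2.2)
    else if row.2.2.2.2.2.2.2 = 0 then (seen, st.2.1, st.2.2.1 + 1, st.2.2.2)
    else (seen, st.2.1, st.2.2.1, st.2.2.2 + 1)
  else st

def label_breakdown_alt (data : List (Int × Int × Int × Bool × Int × Int × Int × Int)) : String :=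
  let st := data.reverse.foldl pvStepB (PySem.Set.empty, 0, 0, 0)
  PySem.Int.toStr st.2.1 ++ " / " ++ PySem.Int.toStr st.2.2.1 ++ " / " ++ PySem.Int.toStr st.2.2.2

-- ===== PRECONDITION & SPEC =====
def Spec_label_breakdown (data : List (Int × Int × Int × Bool × Int × Int × Int × Int)) (out : String) : Prop := out = label_breakdown_alt data
instance (data : List (Int × Int × Int × Bool × Int × Int × Int × Int)) (out : String) : Decidable (Spec_label_breakdown data out) := by unfold Spec_label_breakdown; infer_instance

-- ===== CLAIM (what is proved, stated in full; the proofs are below) =====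
def Claim_equal_label_breakdown : Prop := ∀ (data : List (Int × Int × Int × Bool × Int × Int × Int × Int)), Dom_label_breakdown data → Spec_label_breakdown data (label_breakdown data)

-- ===== LEMMAS AND PROOFS =====

-- keys of valid rows, in order
def pvValidKeys (data : List (Int × Int × Int × Bool × Int × Int × Int × Int)) : List Int :=
  (data.filter (fun r => r.2.2.2.1)).map (fun r => r.2.1)

-- the last valid value recorded for key k (0 if none; matches getD's default)
def pvLastVal (data : List (Int × Int × Int × Bool × Int × Int × Int × Int)) (k : Int) : Int :=
  data.foldl (fun acc r => if r.2.2.2.1 = true ∧ r.2.1 = k then r.2.2.2.2.2.2.2 else acc) 0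

-- classification indicators
def pvI1 (v : Int) : Int := if v = -1 then 1 else 0
def pvI2 (v : Int) : Int := if v = -1 then 0 else if v = 0 then 1 else 0
def pvI3 (v : Int) : Int := if v = -1 then 0 else if v = 0 then 0 else 1

-- the common specification: per-class counts over the distinct valid keys, classified by their last value
def pvCnt (data : List (Int × Int × Int × Bool × Int × Int × Int × Int)) (ind : Int → Int) : Int :=
  ∑ k ∈ (pvValidKeys data).toFinset, ind (pvLastVal data k)

theorem pvValidKeys_append (l : List (Int × Int × Int × Bool × Int × Int × Int × Int)) (row) :
    pvValidKeys (l ++ [row]) = pvValidKeys l ++ (if row.2.2.2.1 then [row.2.1] else []) := by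
  simp [pvValidKeys, List.filter_append]
  split <;> simp_all

theorem pvLastVal_append (l : List (Int × Int × Int × Bool × Int × Int × Int × Int)) (row) (k : Int) :
    pvLastVal (l ++ [row]) k = if row.2.2.2.1 = true ∧ row.2.1 = k then row.2.2.2.2.2.2.2 else pvLastVal l k := by
  simp [pvLastVal, List.foldl_append]

-- ----- A side -----

theorem pvDictOf_append (l : List (Int × Int × Int × Bool × Int × Int × Int × Int)) (row) :
    pvDictOf (l ++ [row]) =
      if row.2.2.2.1 then (pvDictOf l).insert row.2.1 row.2.2.2.2.2.2.2 else pvDictOf l := by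
  simp [pvDictOf, List.foldl_append]

theorem pvDictOf_spec (l : List (Int × Int × Int × Bool × Int × Int × Int × Int)) :
    (pvDictOf l).keys.Nodup ∧ (pvDictOf l).keys.toFinset = (pvValidKeys l).toFinset ∧
      ∀ k : Int, (pvDictOf l).getD k 0 = pvLastVal l k := by
  induction l using List.reverseRecOn with
  | nil => refine ⟨by simp [pvDictOf, PySem.Dict.keys_empty], by simp [pvDictOf, PySem.Dict.keys_empty, pvValidKeys], ?_⟩
           intro k; simp [pvDictOf, PySem.Dict.getD_empty, pvLastVal]
  | append_singleton l row ih =>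
    obtain ⟨hnd, hkeys, hget⟩ := ih
    rw [pvDictOf_append]
    by_cases hv : row.2.2.2.1 = true
    · simp only [hv, if_true]
      refine ⟨?_, ?_, ?_⟩
      · by_cases hc : (pvDictOf l).contains row.2.1 = true
        · rw [PySem.Dict.keys_insert_of_contains _ _ hc]; exact hnd
        · rw [PySem.Dict.keys_insert_of_not_contains _ _ (by simpa using hc)]
          have hc' : (pvDictOf l).contains row.2.1 = false := by simpa using hc
          have hni : row.2.1 ∉ (pvDictOf l).keys := by
            intro h
            rw [(PySem.Dict.contains_iff_mem_keys _ _).mpr h] at hc'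
            simp at hc'
          exact List.Nodup.append hnd (List.nodup_singleton _) (by simpa using hni)
      · have hrhs : (pvValidKeys (l ++ [row])).toFinset =
            insert row.2.1 (pvValidKeys l).toFinset := by
          rw [pvValidKeys_append]; simp [hv]
        rw [hrhs]
        by_cases hc : (pvDictOf l).contains row.2.1 = true
        · rw [PySem.Dict.keys_insert_of_contains _ _ hc, hkeys]
          have : row.2.1 ∈ (pvValidKeys l).toFinset := by
            rw [← hkeys]
            exact List.mem_toFinset.mpr ((PySem.Dict.contains_iff_mem_keys _ _).mp hc)
          rw [Finset.insert_eq_self.mpr this]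
        · rw [PySem.Dict.keys_insert_of_not_contains _ _ (by simpa using hc)]
          simp [hkeys]
      · intro k
        rw [PySem.Dict.getD_insert, pvLastVal_append]
        by_cases hk : k = row.2.1
        · simp [hk, hv]
        · have hk2 : ¬ row.2.1 = k := fun h => hk h.symm
          simp [hk, hk2, hv, hget k]
    · simp only [hv, if_false, Bool.false_eq_true]
      refine ⟨hnd, ?_, ?_⟩
      · rw [hkeys, pvValidKeys_append]; simp [hv]
      · intro k; rw [pvLastVal_append, hget k]; simp [hv]

-- A's counting loop, with the initial triple generalized
theorem pvCountFold (keys : List Int) (f : Int → Int) (n u p : Int) :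
    keys.foldl (fun (t : Int × Int × Int) key =>
      if f key = -1 then (t.1 + 1, t.2.1, t.2.2)
      else if f key = 0 then (t.1, t.2.1 + 1, t.2.2)
      else (t.1, t.2.1, t.2.2 + 1)) (n, u, p) =
      (n + (keys.map (fun k => pvI1 (f k))).sum,
       u + (keys.map (fun k => pvI2 (f k))).sum,
       p + (keys.map (fun k => pvI3 (f k))).sum) := by
  induction keys generalizing n u p with
  | nil => simp
  | cons k rest ih =>
    simp only [List.foldl_cons, List.map_cons, List.sum_cons]
    by_cases h1 : f k = -1
    · simp [h1, ih, pvI1, pvI2, pvI3] <;> omega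
    · by_cases h2 : f k = 0
      · simp [h2, ih, pvI1, pvI2, pvI3] <;> omega
      · simp [h1, h2, ih, pvI1, pvI2, pvI3] <;> omega

theorem pvSum_nodup (l : List Int) (h : l.Nodup) (g : Int → Int) :
    (l.map g).sum = ∑ k ∈ l.toFinset, g k := by
  exact (List.sum_toFinset _ h).symm

theorem label_breakdown_eq_cnt (data : List (Int × Int × Int × Bool × Int × Int × Int × Int)) :
    label_breakdown data =
      PySem.Int.toStr (pvCnt data pvI1) ++ " / " ++ PySem.Int.toStr (pvCnt data pvI2) ++ " / " ++
        PySem.Int.toStr (pvCnt data pvI3) := by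
  obtain ⟨hnd, hkeys, hget⟩ := pvDictOf_spec data
  simp only [label_breakdown]
  rw [pvCountFold _ (fun key => (pvDictOf data).getD key 0)]
  simp only [zero_add]
  have hs : ∀ ind : Int → Int,
      (((pvDictOf data).keys.map (fun k => ind ((pvDictOf data).getD k 0))).sum) = pvCnt data ind := by
    intro ind
    rw [pvSum_nodup _ hnd, hkeys]
    exact Finset.sum_congr rfl (fun k _ => by rw [hget k])
  rw [hs pvI1, hs pvI2, hs pvI3]

-- ----- B side -----

-- invariant of B's single reversed pass, with seen-set and counters generalized
theorem pvBfold_spec (l : List (Int × Int × Int × Bool × Int × Int × Int × Int))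
    (seen : PySem.Set Int) (hnd : seen.Nodup) (n u p : Int) :
    (∀ x, x ∈ (l.reverse.foldl pvStepB (seen, n, u, p)).1 ↔ x ∈ seen ∨ x ∈ pvValidKeys l) ∧
    (l.reverse.foldl pvStepB (seen, n, u, p)).1.Nodup ∧
    (l.reverse.foldl pvStepB (seen, n, u, p)).2 =
      (n + ∑ k ∈ (pvValidKeys l).toFinset \ seen.toFinset, pvI1 (pvLastVal l k),
       u + ∑ k ∈ (pvValidKeys l).toFinset \ seen.toFinset, pvI2 (pvLastVal l k),
       p + ∑ k ∈ (pvValidKeys l).toFinset \ seen.toFinset, pvI3 (pvLastVal l k)) := by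
  induction l using List.reverseRecOn generalizing seen n u p with
  | nil => simp [pvValidKeys, hnd]
  | append_singleton rest row ih =>
    have hrev : (rest ++ [row]).reverse = row :: rest.reverse := by simp
    rw [hrev]
    simp only [List.foldl_cons]
    by_cases hv : row.2.2.2.1 = true
    · by_cases hmem : row.2.1 ∈ seen
      · -- valid but key already seen: state unchanged
        have hstep : pvStepB (seen, n, u, p) row = (seen, n, u, p) := by
          simp [pvStepB, PySem.Set.contains_eq_listContains, hmem]
        rw [hstep]
        obtain ⟨h1, h2, h3⟩ := ih seen hnd n u p
        have hK : (pvValidKeys (rest ++ [row])).toFinset \ seen.toFinset =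
            (pvValidKeys rest).toFinset \ seen.toFinset := by
          ext x
          simp only [pvValidKeys_append, hv, if_true, List.toFinset_append, Finset.mem_sdiff,
            Finset.mem_union, List.mem_toFinset, List.mem_singleton]
          constructor
          · rintro ⟨h | h, hns⟩
            · exact ⟨h, hns⟩
            · exact absurd (h ▸ hmem) hns
          · rintro ⟨h, hns⟩; exact ⟨Or.inl h, hns⟩
        have hlv : ∀ k ∈ (pvValidKeys rest).toFinset \ seen.toFinset,
            pvLastVal (rest ++ [row]) k = pvLastVal rest k := by
          intro k hk
          rw [pvLastVal_append]
          rcases Finset.mem_sdiff.mp hk with ⟨_, hns⟩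
          have : ¬(row.2.2.2.1 = true ∧ row.2.1 = k) := by
            rintro ⟨_, hkk⟩; exact hns (List.mem_toFinset.mpr (hkk ▸ hmem))
          simp [this]
        refine ⟨?_, h2, ?_⟩
        · intro x; rw [h1 x]
          simp only [pvValidKeys_append, hv, if_true, List.mem_append, List.mem_singleton]
          constructor
          · rintro (h | h); exacts [Or.inl h, Or.inr (Or.inl h)]
          · rintro (h | h | h); exacts [Or.inl h, Or.inr h, Or.inl (h ▸ hmem)]
        · have hsum : ∀ ind : Int → Int,
              ∑ k ∈ (pvValidKeys rest).toFinset \ seen.toFinset, ind (pvLastVal (rest ++ [row]) k) =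
                ∑ k ∈ (pvValidKeys rest).toFinset \ seen.toFinset, ind (pvLastVal rest k) :=
            fun ind => Finset.sum_congr rfl (fun k hk => congrArg ind (hlv k hk))
          rw [h3, hK, hsum pvI1, hsum pvI2, hsum pvI3]
      · -- valid and fresh key: counted now, never again
        have hstep : pvStepB (seen, n, u, p) row =
            (seen ++ [row.2.1], n + pvI1 row.2.2.2.2.2.2.2, u + pvI2 row.2.2.2.2.2.2.2,
              p + pvI3 row.2.2.2.2.2.2.2) := by
          simp only [pvStepB, hv, PySem.Set.contains_eq_listContains]
          rw [PySem.Set.add_of_not_mem hmem]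
          have hcf : List.contains seen row.2.1 = false := by
            simpa [List.contains_iff_mem] using hmem
          rw [hcf]
          simp only [Bool.not_false, Bool.and_true, if_true]
          by_cases h1 : row.2.2.2.2.2.2.2 = -1
          · simp [h1, pvI1, pvI2, pvI3]
          · by_cases h2 : row.2.2.2.2.2.2.2 = 0
            · simp [h2, pvI1, pvI2, pvI3]
            · simp [h1, h2, pvI1, pvI2, pvI3]
        rw [hstep]
        have hnd' : (seen ++ [row.2.1]).Nodup :=
          List.Nodup.append hnd (List.nodup_singleton _) (by simpa using hmem)
        obtain ⟨h1, h2, h3⟩ := ih (seen ++ [row.2.1]) hnd' _ _ _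
        have hset : (seen ++ [row.2.1] : List Int).toFinset = insert row.2.1 seen.toFinset := by
          simp
        have herase : ∀ (K S : Finset Int), row.2.1 ∉ S →
            (insert row.2.1 K \ S).erase row.2.1 = K \ insert row.2.1 S := by
          intro K S hns; ext x
          simp only [Finset.mem_erase, Finset.mem_sdiff, Finset.mem_insert]
          constructor
          · rintro ⟨hne, h | h, hx⟩
            · exact absurd h hne
            · exact ⟨h, by rintro (h' | h'); exacts [hne h', hx h']⟩
          · rintro ⟨hx, hns'⟩
            rw [not_or] at hns'
            exact ⟨hns'.1, Or.inr hx, hns'.2⟩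
        have hK' : (pvValidKeys (rest ++ [row])).toFinset =
            insert row.2.1 (pvValidKeys rest).toFinset := by
          rw [pvValidKeys_append]; simp [hv]
        have hsplit : ∀ ind : Int → Int,
            ∑ k ∈ (pvValidKeys (rest ++ [row])).toFinset \ seen.toFinset,
              ind (pvLastVal (rest ++ [row]) k) =
            ind row.2.2.2.2.2.2.2 +
              ∑ k ∈ (pvValidKeys rest).toFinset \ (seen ++ [row.2.1] : List Int).toFinset,
                ind (pvLastVal rest k) := by
          intro ind
          rw [hK']
          have hmemF : row.2.1 ∈ insert row.2.1 (pvValidKeys rest).toFinset \ seen.toFinset := by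
            simp [List.mem_toFinset.not.mpr hmem]
          rw [← Finset.add_sum_erase _ _ hmemF]
          congr 1
          · rw [pvLastVal_append]; simp [hv]
          · rw [herase _ _ (List.mem_toFinset.not.mpr hmem), hset]
            refine Finset.sum_congr rfl (fun k hk => ?_)
            rcases Finset.mem_sdiff.mp hk with ⟨_, hns⟩
            have hne : row.2.1 ≠ k := fun h => hns (by simp [h])
            rw [pvLastVal_append]; simp [hne]
        refine ⟨?_, h2, ?_⟩
        · intro x; rw [h1 x]
          simp only [List.mem_append, List.mem_singleton, pvValidKeys_append, hv, if_true]
          tauto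
        · rw [h3]
          refine Prod.ext ?_ (Prod.ext ?_ ?_) <;>
            simp only [hsplit pvI1, hsplit pvI2, hsplit pvI3] <;> ring
    · -- invalid row: state unchanged, spec unchanged
      have hstep : pvStepB (seen, n, u, p) row = (seen, n, u, p) := by
        simp [pvStepB, hv]
      rw [hstep]
      obtain ⟨h1, h2, h3⟩ := ih seen hnd n u p
      have hK : pvValidKeys (rest ++ [row]) = pvValidKeys rest := by
        rw [pvValidKeys_append]; simp [hv]
      have hlv : ∀ k, pvLastVal (rest ++ [row]) k = pvLastVal rest k := by
        intro k; rw [pvLastVal_append]; simp [hv]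
      refine ⟨?_, h2, ?_⟩
      · intro x; rw [h1 x, hK]
      · have hsum : ∀ ind : Int → Int,
            ∑ k ∈ (pvValidKeys rest).toFinset \ seen.toFinset, ind (pvLastVal (rest ++ [row]) k) =
              ∑ k ∈ (pvValidKeys rest).toFinset \ seen.toFinset, ind (pvLastVal rest k) :=
          fun ind => Finset.sum_congr rfl (fun k _ => congrArg ind (hlv k))
        rw [h3, hK, hsum pvI1, hsum pvI2, hsum pvI3]

theorem label_breakdown_alt_eq_cnt (data : List (Int × Int × Int × Bool × Int × Int × Int × Int)) :
    label_breakdown_alt data =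
      PySem.Int.toStr (pvCnt data pvI1) ++ " / " ++ PySem.Int.toStr (pvCnt data pvI2) ++ " / " ++
        PySem.Int.toStr (pvCnt data pvI3) := by
  obtain ⟨-, -, h3⟩ := pvBfold_spec data PySem.Set.empty (by simp [PySem.Set.empty]) 0 0 0
  simp only [label_breakdown_alt]
  rw [h3]
  simp [pvCnt, PySem.Set.empty]

-- ===== VERDICT (by name: the statement is the Claim_ definition above) =====
theorem label_breakdown_spec : Claim_equal_label_breakdown := by
  intro data _
  show label_breakdown data = label_breakdown_alt data
  rw [label_breakdown_eq_cnt, label_breakdown_alt_eq_cnt]
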